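-- pv_equiv track=rewrite | github.com/srj737/sbailie-aoc-2020 | day6.py | calc_unique_yeses_part2
-- ===== SOURCE A (Python) =====
-- def calc_unique_yeses(code):
--     string = code.replace(' ', '')  # Strip Spaces
--     sorted_characters = sorted(string)  # Sort letters into a list
--     no_duplicates = list(
--         dict.fromkeys(sorted_characters))  # Convert to dictionary then back to a list to remove duplicates
--     count = len(no_duplicates)  # Count unique answers
--     return count, no_duplicates
--
-- def calc_unique_yeses_part2(code):
--     list_of_peep = code.split(' ')  # Strip into a list of each person
--     cumulative = calc_unique_yeses(list_of_peep[0])[1]  # Initialise with first person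
--     for persons_code in list_of_peep:
--         this_person = calc_unique_yeses(persons_code)[1]
--         cumulative = list(set(this_person) & set(cumulative))
--     count = len(cumulative)  # Count unique answers
--     return count
-- ===== SOURCE B (Python) =====
-- def calc_unique_yeses_part2(code):
--     peeps = code.split(' ')
--     n = len(peeps)
--     counts = {}
--     for person in peeps:
--         for c in set(person):
--             counts[c] = counts.get(c, 0) + 1
--     return sum(1 for v in counts.values() if v == n)
-- ===== Notes on version B (the rewrite author's own statement) =====
-- stated objective: faster
-- what changed: Replaces the per-person sort/dedup plus repeated set-intersection loop with a single pass that tallies, per letter, how many persons answered it, then counts the letters whose tally equals the number of persons.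
import Mathlib
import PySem

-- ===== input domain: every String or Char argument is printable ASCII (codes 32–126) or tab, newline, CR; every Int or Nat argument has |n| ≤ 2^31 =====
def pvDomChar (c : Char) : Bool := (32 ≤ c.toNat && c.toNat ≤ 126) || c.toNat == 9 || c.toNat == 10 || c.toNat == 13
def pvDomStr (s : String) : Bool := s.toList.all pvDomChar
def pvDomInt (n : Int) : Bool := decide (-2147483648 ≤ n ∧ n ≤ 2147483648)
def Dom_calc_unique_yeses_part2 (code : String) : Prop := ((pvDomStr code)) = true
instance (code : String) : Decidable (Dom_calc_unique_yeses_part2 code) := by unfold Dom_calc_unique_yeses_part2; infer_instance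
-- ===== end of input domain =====

-- B replaces A's per-person sort/dedup plus repeated set intersections by one pass that
-- tallies per letter how many persons answered it and counts the letters whose tally
-- equals the number of persons (objective: idiomatic).

-- ===== PORT A =====
-- helper: Python's calc_unique_yeses, returning (count, no_duplicates)
def pvCalcUniqueYeses (code : String) : Int × List Char :=
  let string := PySem.Str.replace code " " ""
  let sortedCharacters := PySem.List.sorted string.toList (fun x => x) false
  let noDuplicates := PySem.List.dedup sortedCharacters
  ((noDuplicates.length : Int), noDuplicates)

def calc_unique_yeses_part2 (code : String) : Int :=
  let listOfPeep := (PySem.Str.split? code " ").getD []  -- sep " " is non-empty: split? is always some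
  -- list_of_peep[0]: code.split(' ') always has at least one piece, so the Python index never raises
  let cumulative := listOfPeep.foldl
    (fun cumulative personsCode =>
      PySem.Set.inter (PySem.Set.ofList (pvCalcUniqueYeses personsCode).2)
        (PySem.Set.ofList cumulative))
    ((pvCalcUniqueYeses (listOfPeep.headD "")).2)
  ((cumulative.length : Int))

-- ===== PORT B =====
def calc_unique_yeses_part2_alt (code : String) : Int :=
  let peeps := (PySem.Str.split? code " ").getD []  -- sep " " is non-empty: split? is always some
  let n := peeps.length
  let counts := peeps.foldl
    (fun counts person =>
      (PySem.Set.ofList person.toList).foldl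
        (fun counts c => counts.insert c (counts.getD c 0 + 1)) counts)
    PySem.Dict.empty
  counts.values.foldl (fun acc v => if v == (n : Int) then acc + 1 else acc) 0

-- ===== PRECONDITION & SPEC =====
def Spec_calc_unique_yeses_part2 (code : String) (out : Int) : Prop := out = calc_unique_yeses_part2_alt code
instance (code : String) (out : Int) : Decidable (Spec_calc_unique_yeses_part2 code out) := by unfold Spec_calc_unique_yeses_part2; infer_instance

-- ===== CLAIM (what is proved, stated in full; the proofs are below) =====
def Claim_equal_calc_unique_yeses_part2 : Prop := ∀ (code : String), Dom_calc_unique_yeses_part2 code → Spec_calc_unique_yeses_part2 code (calc_unique_yeses_part2 code)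

-- ===== LEMMAS AND PROOFS =====

-- replacing ' ' by '' filters the spaces out; split(' ') pieces: never empty, no spaces
theorem pvReplaceGoSpace (f : Nat) (l acc : List Char) (h : l.length ≤ f) :
    PySem.Chars.replace.go [' '] [] f l acc = acc.reverse ++ l.filter (fun c => c ≠ ' ') := by
  induction f generalizing l acc with
  | zero =>
    have : l = [] := by cases l <;> simp_all
    subst this; rw [PySem.Chars.replace.go]; simp
  | succ f ih =>
    cases l with
    | nil => rw [PySem.Chars.replace.go] <;> simp
    | cons c t =>
      rw [PySem.Chars.replace.go]
      by_cases hc : c = ' '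
      · subst hc
        rw [if_pos (by simp [List.isPrefixOf])]
        rw [show List.drop ([' '] : List Char).length (' ' :: t) = t from rfl,
          show (([] : List Char).reverse ++ acc) = acc from by simp]
        rw [ih t acc (by simp at h; omega)]
        simp
      · rw [if_neg (by simp [List.isPrefixOf]; exact fun h' => hc h'.symm)]
        rw [ih t (c :: acc) (by simp at h; omega)]
        simp [hc]
theorem pvReplaceSpace (l : List Char) :
    PySem.Chars.replace l [' '] [] = l.filter (fun c => c ≠ ' ') := by
  rw [PySem.Chars.replace, if_neg (by simp)]
  exact pvReplaceGoSpace l.length l [] le_rfl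

theorem pvSplitGoNeNil (f : Nat) (l cur : List Char) (acc : List (List Char)) :
    PySem.Chars.splitOn.go [' '] f l cur acc ≠ [] := by
  induction f generalizing l cur acc with
  | zero => rw [PySem.Chars.splitOn.go]; simp
  | succ f ih =>
    cases l with
    | nil => rw [PySem.Chars.splitOn.go] <;> simp
    | cons c t =>
      rw [PySem.Chars.splitOn.go]
      split
      · exact ih _ _ _
      · exact ih _ _ _
theorem pvSplitGoNoSpace (f : Nat) (l cur : List Char) (acc : List (List Char))
    (h : l.length < f) (hcur : ' ' ∉ cur) (hacc : ∀ x ∈ acc, ' ' ∉ x) :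
    ∀ p ∈ PySem.Chars.splitOn.go [' '] f l cur acc, ' ' ∉ p := by
  induction f generalizing l cur acc with
  | zero => omega
  | succ f ih =>
    cases l with
    | nil =>
      rw [PySem.Chars.splitOn.go]
      · intro p hp
        simp only [List.mem_reverse, List.mem_cons] at hp
        rcases hp with h1 | h2
        · subst h1; simpa using hcur
        · exact hacc p h2
      · simp
    | cons c t =>
      rw [PySem.Chars.splitOn.go]
      by_cases hc : c = ' '
      · subst hc
        rw [if_pos (by simp [List.isPrefixOf])]
        rw [show List.drop ([' '] : List Char).length (' ' :: t) = t from rfl]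
        exact ih _ _ _ (by simp at h ⊢; omega) (by simp)
          (by intro x hx
              simp only [List.mem_cons] at hx
              rcases hx with h1 | h2
              · subst h1; simpa using hcur
              · exact hacc x h2)
      · rw [if_neg (by simp [List.isPrefixOf]; exact fun h' => hc h'.symm)]
        exact ih _ _ _ (by simp at h ⊢; omega)
          (by intro hx; simp only [List.mem_cons] at hx
              rcases hx with h1 | h2
              · exact hc h1.symm
              · exact hcur h2) hacc

theorem pvSplitOnNeNil (l : List Char) : PySem.Chars.splitOn l [' '] ≠ [] := by
  rw [PySem.Chars.splitOn]; exact pvSplitGoNeNil _ _ _ _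

theorem pvSplitOnNoSpace (l : List Char) : ∀ p ∈ PySem.Chars.splitOn l [' '], ' ' ∉ p := by
  rw [PySem.Chars.splitOn]
  exact pvSplitGoNoSpace (l.length + 1) l [] [] (by omega) (by simp) (by simp)

-- the string-level split: always some, pieces are the char-level pieces
theorem pvSplitEq (code : String) :
    ∃ ps : List String, PySem.Str.split? code " " = some ps ∧
      ps.map String.toList = PySem.Chars.splitOn code.toList [' '] := by
  have h := PySem.Str.split?_map code " "
  rw [PySem.Chars.split?, if_neg (by simp)] at h
  cases hs : PySem.Str.split? code " " with
  | none => rw [hs] at h; simp at h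
  | some ps =>
    rw [hs] at h
    simp only [Option.map_some, Option.some.injEq] at h
    exact ⟨ps, rfl, by simpa using h⟩

-- membership in calc_unique_yeses(p)[1]
theorem pvMemA1 (p : String) (c : Char) :
    c ∈ (pvCalcUniqueYeses p).2 ↔ c ∈ p.toList ∧ c ≠ ' ' := by
  simp only [pvCalcUniqueYeses, PySem.List.dedup_eq_ofList, PySem.Set.mem_ofList,
    PySem.List.mem_sorted, PySem.Str.toList_replace]
  have : (" " : String).toList = [' '] := rfl
  have h2 : ("" : String).toList = [] := rfl
  rw [this, h2, pvReplaceSpace]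
  simp

-- membership in A's intersection fold
theorem pvMemAFold (l : List String) (s : List Char) (c : Char) :
    c ∈ l.foldl
      (fun cumulative personsCode =>
        PySem.Set.inter (PySem.Set.ofList (pvCalcUniqueYeses personsCode).2)
          (PySem.Set.ofList cumulative)) s
    ↔ c ∈ s ∧ ∀ p ∈ l, c ∈ (pvCalcUniqueYeses p).2 := by
  induction l generalizing s with
  | nil => simp
  | cons p l ih =>
    rw [List.foldl_cons, ih]
    simp only [PySem.Set.inter, List.mem_filter, PySem.Set.mem_ofList, PySem.Set.contains,
      List.contains_iff_mem, List.mem_cons]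
    constructor
    · rintro ⟨⟨h1, h2⟩, h3⟩
      exact ⟨h2, fun q hq => by rcases hq with rfl | hq; exact h1; exact h3 q hq⟩
    · rintro ⟨h2, h3⟩
      exact ⟨⟨h3 p (Or.inl rfl), h2⟩, fun q hq => h3 q (Or.inr hq)⟩

theorem pvNodupAFold (l : List String) (s : List Char) (hs : s.Nodup) :
    (l.foldl
      (fun cumulative personsCode =>
        PySem.Set.inter (PySem.Set.ofList (pvCalcUniqueYeses personsCode).2)
          (PySem.Set.ofList cumulative)) s).Nodup := by
  induction l generalizing s with
  | nil => exact hs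
  | cons p l ih =>
    exact ih _ ((PySem.Set.nodup_ofList _).filter _)

-- membership in Set.update
theorem pvMemSetUpdate (s : List Char) (xs : List Char) (c : Char) :
    c ∈ PySem.Set.update s xs ↔ c ∈ s ∨ c ∈ xs := by
  induction xs generalizing s with
  | nil => simp [PySem.Set.update]
  | cons x xs ih =>
    have h1 : PySem.Set.update s (x :: xs) = PySem.Set.update (PySem.Set.add s x) xs := rfl
    rw [h1, ih, PySem.Set.mem_add]
    simp only [List.mem_cons]
    tauto

-- keys of B's nested counting fold
theorem pvKeysNodupB (l : List String) (d : PySem.Dict Char Int) (h : d.keys.Nodup) :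
    (l.foldl
      (fun counts person =>
        (PySem.Set.ofList person.toList).foldl
          (fun counts c => counts.insert c (counts.getD c 0 + 1)) counts) d).keys.Nodup := by
  induction l generalizing d with
  | nil => exact h
  | cons p l ih =>
    exact ih _ (PySem.Dict.nodup_keys_foldl_insert _ _ _ h)

theorem pvMemKeysB (l : List String) (d : PySem.Dict Char Int) (c : Char) :
    c ∈ (l.foldl
      (fun counts person =>
        (PySem.Set.ofList person.toList).foldl
          (fun counts c => counts.insert c (counts.getD c 0 + 1)) counts) d).keys
    ↔ c ∈ d.keys ∨ ∃ p ∈ l, c ∈ p.toList := by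
  induction l generalizing d with
  | nil => simp
  | cons p l ih =>
    simp only [List.foldl_cons, ih, PySem.Dict.keys_foldl_insert, pvMemSetUpdate,
      PySem.Set.mem_ofList, List.mem_cons]
    constructor
    · rintro (⟨h | h⟩ | h)
      · exact Or.inl h
      · exact Or.inr ⟨p, Or.inl rfl, h⟩
      · rcases h with ⟨q, hq, hcq⟩; exact Or.inr ⟨q, Or.inr hq, hcq⟩
    · rintro (h | ⟨q, rfl | hq, hcq⟩)
      · exact Or.inl (Or.inl h)
      · exact Or.inl (Or.inr hcq)
      · exact Or.inr ⟨q, hq, hcq⟩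

theorem pvGetDB (l : List String) (d : PySem.Dict Char Int) (c : Char) :
    (l.foldl
      (fun counts person =>
        (PySem.Set.ofList person.toList).foldl
          (fun counts c => counts.insert c (counts.getD c 0 + 1)) counts) d).getD c 0
    = d.getD c 0 + (l.countP (fun p => c ∈ p.toList) : Int) := by
  induction l generalizing d with
  | nil => simp
  | cons p l ih =>
    simp only [List.foldl_cons, ih, PySem.Dict.getD_foldl_insert_add_one, List.countP_cons]
    have : (PySem.Set.ofList p.toList).count c = if c ∈ p.toList then 1 else 0 := by
      by_cases h : c ∈ p.toList
      · rw [if_pos h]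
        exact List.count_eq_one_of_mem (PySem.Set.nodup_ofList _)
          ((PySem.Set.mem_ofList _ _).mpr h)
      · rw [if_neg h, List.count_eq_zero]
        exact fun hc => h ((PySem.Set.mem_ofList _ _).mp hc)
    rw [this]
    by_cases h : c ∈ p.toList <;> simp [h] <;> ring

-- the generic equality, for any non-empty list of space-free pieces
theorem pvMainGen (ps : List String) (hne : ps ≠ [])
    (hsp : ∀ p ∈ ps, ' ' ∉ p.toList) :
    (((ps.foldl
      (fun cumulative personsCode =>
        PySem.Set.inter (PySem.Set.ofList (pvCalcUniqueYeses personsCode).2)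
          (PySem.Set.ofList cumulative))
      ((pvCalcUniqueYeses (ps.headD "")).2)).length : Int))
    = (ps.foldl
        (fun counts person =>
          (PySem.Set.ofList person.toList).foldl
            (fun counts c => counts.insert c (counts.getD c 0 + 1)) counts)
        PySem.Dict.empty).values.foldl
        (fun acc v => if v == (ps.length : Int) then acc + 1 else acc) 0 := by
  obtain ⟨p0, rest, rfl⟩ : ∃ p0 rest, ps = p0 :: rest := by
    cases ps with
    | nil => exact absurd rfl hne
    | cons a b => exact ⟨a, b, rfl⟩
  set ps := p0 :: rest with hps
  -- the common predicate: c answered yes by every person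
  set good : Char → Bool := fun c => ps.all (fun p => decide (c ∈ p.toList)) with hgood
  set D := ps.foldl
      (fun counts person =>
        (PySem.Set.ofList person.toList).foldl
          (fun counts c => counts.insert c (counts.getD c 0 + 1)) counts)
      (PySem.Dict.empty (κ := Char) (ν := Int)) with hD
  have hkeysnodup : D.keys.Nodup := pvKeysNodupB _ _ (by simp [PySem.Dict.empty, PySem.Dict.keys])
  -- B's side: values → keys
  rw [PySem.List.foldl_count_if (fun v => v == (ps.length : Int)) D.values 0,
    PySem.Dict.values_eq_map_keys D hkeysnodup 0, List.countP_map]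
  -- the counted predicate agrees with `good` on keys
  have hpred : ∀ c ∈ D.keys,
      ((fun v => v == (ps.length : Int)) ∘ fun k => D.getD k 0) c = good c := by
    intro c _
    simp only [Function.comp, hD, pvGetDB, hgood]
    have hgd : (PySem.Dict.empty (κ := Char) (ν := Int)).getD c 0 = 0 := by
      simp [PySem.Dict.empty, PySem.Dict.getD, PySem.Dict.get?]
    rw [hgd, zero_add]
    by_cases h : ∀ p ∈ ps, c ∈ p.toList
    · have hcnt : ps.countP (fun p => c ∈ p.toList) = ps.length :=
        List.countP_eq_length.mpr (by simpa using h)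
      have h1 : ((ps.countP (fun p => c ∈ p.toList) : Int) == (ps.length : Int)) = true := by
        simp [hcnt]
      have h2 : ps.all (fun p => decide (c ∈ p.toList)) = true := by
        simpa [List.all_eq_true] using h
      rw [h1, h2]
    · have hlt : ps.countP (fun p => c ∈ p.toList) ≠ ps.length := by
        intro hc
        exact h (by simpa using List.countP_eq_length.mp hc)
      have h1 : ((ps.countP (fun p => c ∈ p.toList) : Int) == (ps.length : Int)) = false := by
        simp only [beq_eq_false_iff_ne, ne_eq]
        exact_mod_cast hlt
      have h2 : ps.all (fun p => decide (c ∈ p.toList)) = false := by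
        rw [← Bool.not_eq_true, List.all_eq_true]
        simpa using h
      rw [h1, h2]
  rw [List.countP_congr (fun x hx => by rw [hpred x hx]), List.countP_eq_length_filter]
  -- A's side: the fold result is a nodup list with the same members as keys.filter good
  rw [zero_add]
  congr 1
  have hnodupA : (ps.foldl
      (fun cumulative personsCode =>
        PySem.Set.inter (PySem.Set.ofList (pvCalcUniqueYeses personsCode).2)
          (PySem.Set.ofList cumulative))
      ((pvCalcUniqueYeses (ps.headD "")).2)).Nodup := by
    apply pvNodupAFold
    simp only [pvCalcUniqueYeses, PySem.List.dedup_eq_ofList]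
    exact PySem.Set.nodup_ofList _
  apply List.Perm.length_eq
  rw [List.perm_ext_iff_of_nodup hnodupA (hkeysnodup.filter _)]
  intro c
  rw [pvMemAFold, List.mem_filter]
  have hp0 : p0 ∈ ps := by simp [hps]
  constructor
  · rintro ⟨_, hall⟩
    have hmem : ∀ p ∈ ps, c ∈ p.toList := fun p hp => ((pvMemA1 p c).mp (hall p hp)).1
    refine ⟨?_, by simp [hgood, List.all_eq_true]; exact fun p hp => hmem p hp⟩
    rw [hD, pvMemKeysB]
    exact Or.inr ⟨p0, hp0, hmem p0 hp0⟩
  · rintro ⟨_, hg⟩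
    have hmem : ∀ p ∈ ps, c ∈ p.toList := by
      simpa [hgood, List.all_eq_true] using hg
    have hnsp : c ≠ ' ' := fun hc => hsp p0 hp0 (hc ▸ hmem p0 hp0)
    have hall : ∀ p ∈ ps, c ∈ (pvCalcUniqueYeses p).2 :=
      fun p hp => (pvMemA1 p c).mpr ⟨hmem p hp, hnsp⟩
    exact ⟨by simpa [hps] using hall p0 hp0, hall⟩

-- ===== VERDICT (by name: the statement is the Claim_ definition above) =====
theorem calc_unique_yeses_part2_spec : Claim_equal_calc_unique_yeses_part2 := by
  intro code _
  unfold Spec_calc_unique_yeses_part2 calc_unique_yeses_part2 calc_unique_yeses_part2_alt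
  obtain ⟨ps, hps, hmap⟩ := pvSplitEq code
  rw [hps]
  simp only [Option.getD_some]
  have hne : ps ≠ [] := by
    intro h
    rw [h] at hmap
    exact pvSplitOnNeNil code.toList hmap.symm
  have hsp : ∀ p ∈ ps, ' ' ∉ p.toList := by
    intro p hp
    exact pvSplitOnNoSpace code.toList p.toList (hmap ▸ List.mem_map_of_mem hp)
  exact pvMainGen ps hne hsp
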